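-- pv_equiv track=rewrite | github.com/paveenH/AIcup | data_processing/data_processing_task1_1127.py | concatenate_validation
-- ===== SOURCE A (Python) =====
-- def append_length(line):
--     length = len(line)
--     current_content = line.replace("\t", " ").replace("\n", " ")
--     # current_content = line.strip()
--     while len(current_content) < length:
--         current_content += " "
--     return current_content
--
-- def validation_segment(sentence, max_length=256, overlap=30):
--     """
--     将长句子切分为多个段落，每个段落长度不超过 max_length，且段落之间有 overlap 字符的重合。
--     """
--     segments = []
--     stride = max_length - overlap  # 实际滑动步长
--     i = 0
--
--     while i < len(sentence):
--         segment = sentence[i:i + max_length]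
--         segments.append(segment)
--         i += stride
--
--     return segments
--
-- def concatenate_validation(lines, max_length=256, dtype="original"):
--     concatenated_data = []
--     for i in range(len(lines)):
--         # current_content = lines[i]
--         current_content = append_length(lines[i])
--
--         # long sentence segment
--         if len(lines[i])>max_length and dtype == "sliced":
--             concatenated_data += validation_segment(lines[i], max_length, 30)
--             continue
--
--         elif dtype == "spliced":
--             if len (lines[i])>max_length:
--                 # to keep boundry with original
--                 concatenated_data.append("")
--         # short sentence concatnation
--             else:
--                 j = i + 1
--                 flag = 0
--                 while j < len(lines):
--                     next_line = append_length(lines[j])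
--                     # next_line = lines[j]
--                     new_content = current_content + next_line
--                     if len(new_content) < max_length:
--                         current_content = new_content
--                         flag = 1
--                     else:
--                         break
--                     j += 1
--
--                 if flag:
--                     concatenated_data.append(current_content)
--                 else:
--                     concatenated_data.append("")
--
--     return concatenated_data
-- ===== SOURCE B (Python) =====
-- def concatenate_validation(lines, max_length=256, dtype="original"):
--     if dtype == "sliced":
--         out = []
--         stride = max_length - 30
--         for line in lines:
--             if len(line) > max_length:
--                 out.extend(line[k:k + max_length] for k in range(0, len(line), stride))
--         return out
--     if dtype != "spliced":
--         return []
--     clean = [line.replace("\t", " ").replace("\n", " ") for line in lines]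
--     n = len(lines)
--     pref = [0] * (n + 1)
--     for i, line in enumerate(lines):
--         pref[i + 1] = pref[i] + len(line)
--     out = []
--     e = 0
--     for i in range(n):
--         if len(lines[i]) > max_length:
--             out.append("")
--             continue
--         if e < i + 1:
--             e = i + 1
--         while e < n and pref[e + 1] - pref[i] < max_length:
--             e += 1
--         out.append("".join(clean[i:e]) if e >= i + 2 else "")
--     return out
-- ===== Notes on version B (the rewrite author's own statement) =====
-- stated objective: faster
-- what changed: B dispatches on dtype once, computes prefix sums of line lengths and advances a two-pointer window (plus one sanitized copy of each line) instead of A's per-line inner rescan with repeated string concatenation in spliced mode, and emits sliced-mode segments as slices over a stride range instead of A's hand-stepped while loop.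
import Mathlib
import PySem

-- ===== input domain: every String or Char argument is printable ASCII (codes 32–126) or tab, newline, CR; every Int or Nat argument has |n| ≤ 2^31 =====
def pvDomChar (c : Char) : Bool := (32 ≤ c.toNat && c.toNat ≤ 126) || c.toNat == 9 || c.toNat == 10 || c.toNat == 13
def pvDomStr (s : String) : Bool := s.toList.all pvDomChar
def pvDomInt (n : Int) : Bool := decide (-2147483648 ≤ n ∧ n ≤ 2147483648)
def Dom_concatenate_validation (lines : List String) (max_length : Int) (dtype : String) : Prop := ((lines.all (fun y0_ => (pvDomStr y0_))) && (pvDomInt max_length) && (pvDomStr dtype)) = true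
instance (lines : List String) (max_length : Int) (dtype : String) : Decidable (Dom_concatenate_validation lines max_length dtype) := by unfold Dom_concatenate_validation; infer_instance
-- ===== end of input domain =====

-- B replaces A's per-line inner rescan (spliced mode) by prefix sums of line lengths with a
-- two-pointer window, and A's hand-stepped segment loop (sliced mode) by a map over a stride range;
-- objective: a faster algorithm on spliced inputs. Equality is about the RETURN value (neither side mutates its input).

-- ===== PORT A =====
-- while len(current_content) < length: current_content += " "
def pvPadLoop (target : Nat) (s : List Char) : List Char :=
  if s.length < target then pvPadLoop target (s ++ [' ']) else s
termination_by target - s.length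
decreasing_by simp [List.length_append]; omega

def pvAppendLength (line : List Char) : List Char :=
  pvPadLoop line.length (PySem.Chars.replace (PySem.Chars.replace line ['\t'] [' ']) ['\n'] [' '])

-- while i < len(sentence): … ; i += stride   (the '0 < stride' guard only makes the loop total:
-- Python diverges for stride ≤ 0, and Pre_ excludes exactly those inputs)
def pvSegLoop (sentence : List Char) (max_length stride i : Int) (acc : List (List Char)) : List (List Char) :=
  if _h : i < (sentence.length : Int) ∧ 0 < stride then
    pvSegLoop sentence max_length stride (i + stride)
      (acc ++ [PySem.List.slice sentence (some i) (some (i + max_length))])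
  else acc
termination_by ((sentence.length : Int) - i).toNat
decreasing_by omega

def pvValidationSegment (sentence : List Char) (max_length overlap : Int) : List (List Char) :=
  pvSegLoop sentence max_length (max_length - overlap) 0 []

-- the inner 'while j < len(lines)' of the spliced branch
def pvInnerLoop (ls : List (List Char)) (max_length : Int) (current : List Char) (flag : Bool) (j : Nat) : List Char × Bool :=
  if h : j < ls.length then
    let next := pvAppendLength ls[j]
    let newc := current ++ next
    if (newc.length : Int) < max_length then pvInnerLoop ls max_length newc true (j + 1)
    else (current, flag)
  else (current, flag)
termination_by ls.length - j

-- for i in range(len(lines)): …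
def pvALoop (ls : List (List Char)) (max_length : Int) (dtype : String) (i : Nat) (acc : List (List Char)) : List (List Char) :=
  if h : i < ls.length then
    let li := ls[i]
    let current := pvAppendLength li
    let acc' :=
      if max_length < (li.length : Int) ∧ dtype = "sliced" then
        acc ++ pvValidationSegment li max_length 30
      else if dtype = "spliced" then
        if max_length < (li.length : Int) then acc ++ [[]]
        else
          let r := pvInnerLoop ls max_length current false (i + 1)
          if r.2 then acc ++ [r.1] else acc ++ [[]]
      else acc
    pvALoop ls max_length dtype (i + 1) acc'
  else acc
termination_by ls.length - i

def concatenate_validation (lines : List String) (max_length : Int) (dtype : String) : List String :=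
  (pvALoop (lines.map String.toList) max_length dtype 0 []).map String.ofList

-- ===== PORT B =====
def pvClean (line : List Char) : List Char :=
  PySem.Chars.replace (PySem.Chars.replace line ['\t'] [' ']) ['\n'] [' ']

-- while e < n and pref[e+1] - pref[i] < max_length: e += 1
def pvWhileE (pref : List Int) (n : Nat) (max_length : Int) (i e : Nat) : Nat :=
  if h : e < n ∧ pref.getD (e + 1) 0 - pref.getD i 0 < max_length then
    pvWhileE pref n max_length i (e + 1)
  else e
termination_by n - e

-- for i in range(n): … with the two-pointer e carried across iterations
def pvBLoop (ls clean : List (List Char)) (pref : List Int) (max_length : Int) (i e : Nat) (out : List (List Char)) : List (List Char) :=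
  if h : i < ls.length then
    if max_length < ((ls[i]).length : Int) then
      pvBLoop ls clean pref max_length (i + 1) e (out ++ [[]])
    else
      let e1 := if e < i + 1 then i + 1 else e
      let e2 := pvWhileE pref ls.length max_length i e1
      pvBLoop ls clean pref max_length (i + 1) e2
        (out ++ [if i + 2 ≤ e2 then PySem.Chars.join [] (PySem.List.slice clean (some (i : Int)) (some (e2 : Int))) else []])
  else out
termination_by ls.length - i

def concatenate_validation_alt (lines : List String) (max_length : Int) (dtype : String) : List String :=
  let ls := lines.map String.toList
  if dtype = "sliced" then
    let stride := max_length - 30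
    (ls.foldl (fun out line =>
      if max_length < (line.length : Int) then
        out ++ (PySem.List.pyRange 0 (line.length : Int) stride).map
          (fun k => PySem.List.slice line (some k) (some (k + max_length)))
      else out) []).map String.ofList
  else if dtype = "spliced" then
    let clean := ls.map pvClean
    let pref := List.scanl (fun a l => a + ((l : List Char).length : Int)) 0 ls
    (pvBLoop ls clean pref max_length 0 0 []).map String.ofList
  else []

-- ===== PRECONDITION & SPEC =====
-- Python A diverges (validation_segment never advances: its stride max_length-30 is ≤ 0) when
-- dtype == "sliced", max_length ≤ 30 and some line is longer than max_length; Pre_ excludes exactly that.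
def Pre_concatenate_validation (lines : List String) (max_length : Int) (dtype : String) : Prop :=
  dtype = "sliced" → 30 < max_length ∨ ∀ l ∈ lines, (l.toList.length : Int) ≤ max_length
instance (lines : List String) (max_length : Int) (dtype : String) : Decidable (Pre_concatenate_validation lines max_length dtype) := by unfold Pre_concatenate_validation; infer_instance

def pvWitness_concatenate_validation : List String × Int × String := (["ab", "c"], 5, "spliced")

def Spec_concatenate_validation (lines : List String) (max_length : Int) (dtype : String) (out : List String) : Prop := out = concatenate_validation_alt lines max_length dtype
instance (lines : List String) (max_length : Int) (dtype : String) (out : List String) : Decidable (Spec_concatenate_validation lines max_length dtype out) := by unfold Spec_concatenate_validation; infer_instance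

-- ===== CLAIM (what is proved, stated in full; the proofs are below) =====
def Claim_equal_concatenate_validation : Prop := ∀ (lines : List String) (max_length : Int) (dtype : String), Dom_concatenate_validation lines max_length dtype → Pre_concatenate_validation lines max_length dtype → Spec_concatenate_validation lines max_length dtype (concatenate_validation lines max_length dtype)

-- ===== LEMMAS AND PROOFS =====

-- replacing one char by one char keeps the length
theorem pvReplaceGoLen (c d : Char) : ∀ (fuel : Nat) (l acc : List Char),
    (PySem.Chars.replace.go [c] [d] fuel l acc).length = acc.length + l.length := by
  intro fuel
  induction fuel with
  | zero => intro l acc; simp [PySem.Chars.replace.go]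
  | succ n ih =>
    intro l acc
    cases l with
    | nil => simp [PySem.Chars.replace.go]
    | cons x t =>
      rw [PySem.Chars.replace.go]
      split_ifs with hp
      · rw [ih]; simp; omega
      · rw [ih]; simp; omega

theorem pvReplaceLen (s : List Char) (c d : Char) :
    (PySem.Chars.replace s [c] [d]).length = s.length := by
  rw [PySem.Chars.replace]
  simp [pvReplaceGoLen]

theorem pvCleanLen (s : List Char) : (pvClean s).length = s.length := by
  simp [pvClean, pvReplaceLen]

theorem pvPadLoopEq (target : Nat) (s : List Char) (h : ¬ s.length < target) : pvPadLoop target s = s := by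
  rw [pvPadLoop]; simp [h]

-- A's append_length never actually pads: the replacements keep the length
theorem pvAppendLengthEq (s : List Char) : pvAppendLength s = pvClean s := by
  have h : (pvClean s).length = s.length := pvCleanLen s
  show pvPadLoop s.length (pvClean s) = pvClean s
  exact pvPadLoopEq _ _ (by omega)

-- prefix sums of line lengths
def pvSum (ls : List (List Char)) (k : Nat) : Int := ((ls.take k).map (fun l => (l.length : Int))).sum

theorem pvSum_succ (ls : List (List Char)) (k : Nat) (hk : k < ls.length) :
    pvSum ls (k + 1) = pvSum ls k + (ls[k].length : Int) := by
  unfold pvSum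
  rw [List.map_take, List.sum_take_succ _ _ (by simpa using hk)]
  simp

theorem pvSum_mono (ls : List (List Char)) (j k : Nat) (hjk : j ≤ k) (hk : k ≤ ls.length) :
    pvSum ls j ≤ pvSum ls k := by
  induction k with
  | zero => have : j = 0 := by omega
            simp [this]
  | succ n ih =>
    rcases Nat.lt_or_ge j (n+1) with h | h
    · have := ih (by omega) (by omega)
      have h2 := pvSum_succ ls n (by omega)
      have : (0:Int) ≤ (ls[n].length : Int) := by positivity
      omega
    · have : j = n + 1 := by omega
      simp [this]

theorem pvScanlGetD (ls : List (List Char)) : ∀ (b : Int) (k : Nat), k ≤ ls.length →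
    (List.scanl (fun a l => a + ((l : List Char).length : Int)) b ls).getD k 0 = b + pvSum ls k := by
  induction ls with
  | nil => intro b k hk
           have : k = 0 := by simpa using hk
           subst this
           simp [pvSum]
  | cons x t ih =>
    intro b k hk
    rw [List.scanl_cons]
    cases k with
    | zero => simp [pvSum]
    | succ n =>
      have := ih (b + (x.length : Int)) n (by simpa using hk)
      simp only [List.getD_cons_succ, this]
      have : pvSum (x :: t) (n + 1) = (x.length : Int) + pvSum t n := by
        simp [pvSum, List.take_succ_cons]
      omega

theorem pvWhileE_ge (pref : List Int) (n : Nat) (m : Int) (i : Nat) : ∀ e, e ≤ pvWhileE pref n m i e := by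
  intro e
  induction e using pvWhileE.induct pref n m i with
  | case1 e h ih => rw [pvWhileE, dif_pos h]; omega
  | case2 e h => rw [pvWhileE, dif_neg h]

theorem pvWhileE_le (pref : List Int) (n : Nat) (m : Int) (i : Nat) : ∀ e, e ≤ n → pvWhileE pref n m i e ≤ n := by
  intro e
  induction e using pvWhileE.induct pref n m i with
  | case1 e h ih => intro _; rw [pvWhileE, dif_pos h]; exact ih (by omega)
  | case2 e h => intro he; rw [pvWhileE, dif_neg h]; exact he

theorem pvWhileE_sound (pref : List Int) (n : Nat) (m : Int) (i : Nat) : ∀ e k, e ≤ k → k < pvWhileE pref n m i e →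
    k < n ∧ pref.getD (k + 1) 0 - pref.getD i 0 < m := by
  intro e
  induction e using pvWhileE.induct pref n m i with
  | case1 e h ih =>
    intro k hek hk
    rw [pvWhileE, dif_pos h] at hk
    rcases Nat.eq_or_lt_of_le hek with rfl | hlt
    · exact ⟨h.1, h.2⟩
    · exact ih k (by omega) hk
  | case2 e h =>
    intro k hek hk
    rw [pvWhileE, dif_neg h] at hk
    omega

theorem pvWhileE_skip (pref : List Int) (n : Nat) (m : Int) (i : Nat) : ∀ e e', e ≤ e' →
    (∀ k, e ≤ k → k < e' → k < n ∧ pref.getD (k + 1) 0 - pref.getD i 0 < m) →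
    pvWhileE pref n m i e = pvWhileE pref n m i e' := by
  intro e e' hee
  induction e using pvWhileE.induct pref n m i with
  | case1 e h ih =>
    intro hcond
    rcases Nat.eq_or_lt_of_le hee with rfl | hlt
    · rfl
    · rw [pvWhileE, dif_pos h]
      exact ih (by omega) (fun k hk hk' => hcond k (by omega) hk')
  | case2 e h =>
    intro hcond
    rcases Nat.eq_or_lt_of_le hee with rfl | hlt
    · rfl
    · exact absurd (hcond e (le_refl e) hlt) h

-- "".join = flatten
theorem pvJoinNil (xs : List (List Char)) : PySem.Chars.join [] xs = xs.flatten := by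
  simp [PySem.Chars.join, List.intercalate]
  induction xs with
  | nil => simp
  | cons a t ih =>
    cases t with
    | nil => simp
    | cons b u => simp_all [List.intersperse]

-- A's inner while loop computes the join of clean lines up to the two-pointer boundary
theorem pvInnerEq (ls : List (List Char)) (m : Int) (pref : List Int)
    (hpref : ∀ k, k ≤ ls.length → pref.getD k 0 = pvSum ls k) (i : Nat) (hi : i ≤ ls.length) :
    ∀ j c f, j ≤ ls.length → (c.length : Int) = pvSum ls j - pvSum ls i →
    pvInnerLoop ls m c f j =
      (c ++ (((ls.map pvClean).drop j).take (pvWhileE pref ls.length m i j - j)).flatten,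
       f || decide (j < pvWhileE pref ls.length m i j)) := by
  intro j
  induction j using pvWhileE.induct pref ls.length m i with
  | case1 j h ih =>
    intro c f hj hc
    have hjn : j < ls.length := h.1
    have hWeq : pvWhileE pref ls.length m i j = pvWhileE pref ls.length m i (j+1) := by
      rw [pvWhileE, dif_pos h]
    have hgecond : j + 1 ≤ pvWhileE pref ls.length m i (j+1) := pvWhileE_ge pref ls.length m i (j+1)
    have hlen : ((c ++ pvAppendLength ls[j]).length : Int) = pvSum ls (j+1) - pvSum ls i := by
      rw [List.length_append, pvAppendLengthEq, pvSum_succ ls j hjn]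
      push_cast [pvCleanLen]
      omega
    have hcondA : ((c ++ pvAppendLength ls[j]).length : Int) < m := by
      rw [hlen]
      have h2 := h.2
      rw [hpref (j+1) (by omega), hpref i hi] at h2
      exact h2
    rw [pvInnerLoop, dif_pos hjn]
    simp only [if_pos hcondA]
    rw [ih (c ++ pvAppendLength ls[j]) true (by omega) hlen]
    rw [hWeq]
    have hdrop : (ls.map pvClean).drop j = pvClean ls[j] :: (ls.map pvClean).drop (j+1) := by
      rw [List.drop_eq_getElem_cons (by simpa using hjn)]
      simp
    simp only [Prod.mk.injEq]
    refine ⟨?_, ?_⟩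
    · rw [hdrop]
      have : pvWhileE pref ls.length m i (j+1) - j = (pvWhileE pref ls.length m i (j+1) - (j+1)) + 1 := by omega
      rw [this, List.take_succ_cons, List.flatten_cons, pvAppendLengthEq]
      simp
    · simp
      omega
  | case2 j h =>
    intro c f hj hc
    have hW : pvWhileE pref ls.length m i j = j := by rw [pvWhileE, dif_neg h]
    rw [hW]
    simp only [Nat.sub_self, List.take_zero, List.flatten_nil, List.append_nil, Nat.lt_irrefl,
      decide_false, Bool.or_false]
    by_cases hjn : j < ls.length
    · have hcond : ¬ (pref.getD (j+1) 0 - pref.getD i 0 < m) := fun hc2 => h ⟨hjn, hc2⟩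
      rw [hpref (j+1) (by omega), hpref i hi] at hcond
      have hlen : ((c ++ pvAppendLength ls[j]).length : Int) = pvSum ls (j+1) - pvSum ls i := by
        rw [List.length_append, pvAppendLengthEq, pvSum_succ ls j hjn]
        push_cast [pvCleanLen]
        omega
      have hA : ¬ (((c ++ pvAppendLength ls[j]).length : Int) < m) := by rw [hlen]; omega
      rw [pvInnerLoop, dif_pos hjn]
      simp only [if_neg hA]
    · rw [pvInnerLoop, dif_neg hjn]

-- the spliced loops of A and B agree, given the two-pointer invariant
theorem pvSplicedEq (ls : List (List Char)) (m : Int) (pref : List Int)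
    (hpref : ∀ k, k ≤ ls.length → pref.getD k 0 = pvSum ls k) :
    ∀ (K i e : Nat) (acc : List (List Char)), ls.length - i ≤ K → e ≤ ls.length →
    (∀ k, i + 1 ≤ k → k < e → k < ls.length ∧ pvSum ls (k + 1) - pvSum ls i < m) →
    pvALoop ls m "spliced" i acc = pvBLoop ls (ls.map pvClean) pref m i e acc := by
  intro K
  induction K with
  | zero =>
    intro i e acc hK he hInv
    have hin : ¬ i < ls.length := by omega
    rw [pvALoop, dif_neg hin, pvBLoop, dif_neg hin]
  | succ K ih =>
    intro i e acc hK he hInv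
    by_cases hin : i < ls.length
    · rw [pvALoop, dif_pos hin, pvBLoop, dif_pos hin]
      have hmono : pvSum ls i ≤ pvSum ls (i + 1) := pvSum_mono ls i (i+1) (by omega) (by omega)
      have hns : ¬ (m < ((ls[i]).length : Int) ∧ ("spliced" : String) = "sliced") := by
        rintro ⟨-, hq⟩; exact absurd hq (by decide)
      simp only [if_neg hns]
      by_cases hlong : m < ((ls[i]).length : Int)
      · simp only [if_pos hlong]
        exact ih (i+1) e (acc ++ [[]]) (by omega) he
          (fun k hk1 hk2 => by
            have := hInv k (by omega) hk2
            exact ⟨this.1, by omega⟩)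
      · simp only [if_neg hlong]
        have hrc : ((pvAppendLength ls[i]).length : Int) = pvSum ls (i+1) - pvSum ls i := by
          rw [pvAppendLengthEq]
          rw [pvSum_succ ls i hin]
          push_cast [pvCleanLen]
          omega
        rw [pvInnerEq ls m pref hpref i (by omega) (i+1) _ false (by omega) hrc]
        set e1 := if e < i + 1 then i + 1 else e with he1def
        have he1n : e1 ≤ ls.length := by
          rw [he1def]; split_ifs <;> omega
        have he1ge : i + 1 ≤ e1 := by rw [he1def]; split_ifs <;> omega
        have he2 : pvWhileE pref ls.length m i e1 = pvWhileE pref ls.length m i (i+1) := by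
          rw [he1def]
          split_ifs with hcase
          · rfl
          · symm
            apply pvWhileE_skip pref ls.length m i (i+1) e (by omega)
            intro k hk1 hk2
            have := hInv k hk1 hk2
            refine ⟨this.1, ?_⟩
            rw [hpref (k+1) (by omega), hpref i (by omega)]
            exact this.2
        set W := pvWhileE pref ls.length m i (i+1) with hWdef
        have hWge : i + 1 ≤ W := pvWhileE_ge pref ls.length m i (i+1)
        have hWle : W ≤ ls.length := pvWhileE_le pref ls.length m i (i+1) (by omega)
        rw [he2]
        have hdrop : (ls.map pvClean).drop i = pvClean ls[i] :: (ls.map pvClean).drop (i+1) := by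
          rw [List.drop_eq_getElem_cons (by simpa using hin)]
          simp
        have hInv' : ∀ k, i + 2 ≤ k → k < W → k < ls.length ∧ pvSum ls (k+1) - pvSum ls (i+1) < m := by
          intro k hk1 hk2
          rcases Nat.lt_or_ge k e1 with hke | hke
          · have h3 : e1 = e ∨ e1 = i+1 := by rw [he1def]; split_ifs <;> simp
            rcases h3 with h3 | h3
            · have := hInv k (by omega) (by omega)
              exact ⟨this.1, by omega⟩
            · omega
          · have hs := pvWhileE_sound pref ls.length m i e1 k hke (by rw [he2]; exact hk2)
            have h2 := hs.2
            rw [hpref (k+1) (by omega), hpref i (by omega)] at h2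
            exact ⟨hs.1, by omega⟩
        have hstep : (if (false || decide (i + 1 < W)) = true then
              acc ++ [pvAppendLength ls[i] ++ (((ls.map pvClean).drop (i+1)).take (W - (i+1))).flatten]
            else acc ++ [[]])
            = acc ++ [if i + 2 ≤ W then PySem.Chars.join []
                (PySem.List.slice (ls.map pvClean) (some (i : Int)) (some (W : Int))) else []] := by
          by_cases hflag : i + 1 < W
          · rw [if_pos (by simp [hflag]), if_pos (by omega)]
            rw [PySem.List.slice_natCast, pvJoinNil, hdrop]
            have h4 : W - i = (W - (i+1)) + 1 := by omega
            rw [h4, List.take_succ_cons, List.flatten_cons, pvAppendLengthEq]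
          · rw [if_neg (by simp [hflag]), if_neg (by omega)]
        dsimp only
        rw [hstep]
        exact ih (i+1) W _ (by omega) hWle hInv'
    · rw [pvALoop, dif_neg hin, pvBLoop, dif_neg hin]

theorem pvRangeCons (a b s : Int) (h : 0 < s) (hab : a < b) :
    PySem.List.pyRange a b s = a :: PySem.List.pyRange (a + s) b s := by
  rw [PySem.List.pyRange_of_pos _ _ h, PySem.List.pyRange_of_pos _ _ h]
  have hd : 0 ≤ (b - a - 1) / s := Int.ediv_nonneg (by omega) (by omega)
  have key : b - a + s - 1 = (b - a - 1) + 1 * s := by ring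
  have hc : ((b - a + s - 1) / s).toNat
      = (if a + s < b then ((b - (a + s) + s - 1) / s).toNat else 0) + 1 := by
    rw [key, Int.add_mul_ediv_right _ _ (by omega : s ≠ 0)]
    split_ifs with h2
    · have : b - (a + s) + s - 1 = b - a - 1 := by ring
      rw [this]; omega
    · have : (b - a - 1) / s = 0 := Int.ediv_eq_zero_of_lt (by omega) (by omega)
      omega
  rw [if_pos hab, hc, List.range_succ_eq_map]
  simp [List.map_map]
  intro k _
  ring

theorem pvRangeNil (a b s : Int) (h : 0 < s) (hab : ¬ a < b) : PySem.List.pyRange a b s = [] := by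
  rw [PySem.List.pyRange_of_pos _ _ h]; simp [hab]

-- A's segment loop is B's map over the stride range (positive stride)
theorem pvSegLoopEq (s : List Char) (mL stride : Int) (h : 0 < stride) :
    ∀ (K : Nat) (i : Int) (acc : List (List Char)), ((s.length : Int) - i).toNat ≤ K →
    pvSegLoop s mL stride i acc = acc ++ (PySem.List.pyRange i (s.length : Int) stride).map
      (fun k => PySem.List.slice s (some k) (some (k + mL))) := by
  intro K
  induction K with
  | zero =>
    intro i acc hK
    have hni : ¬ i < (s.length : Int) := by omega
    rw [pvSegLoop, dif_neg (by tauto), pvRangeNil _ _ _ h hni]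
    simp
  | succ K ih =>
    intro i acc hK
    by_cases hi : i < (s.length : Int)
    · rw [pvSegLoop, dif_pos ⟨hi, h⟩, ih (i + stride) _ (by omega),
        pvRangeCons i _ stride h hi]
      simp
    · rw [pvSegLoop, dif_neg (by tauto), pvRangeNil _ _ _ h hi]
      simp

theorem pvSlicedEq (ls : List (List Char)) (m : Int)
    (hpre : 30 < m ∨ ∀ l ∈ ls, (l.length : Int) ≤ m) :
    ∀ (K i : Nat) (acc : List (List Char)), ls.length - i ≤ K →
    pvALoop ls m "sliced" i acc =
      (ls.drop i).foldl (fun out line =>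
        if m < (line.length : Int) then
          out ++ (PySem.List.pyRange 0 (line.length : Int) (m - 30)).map
            (fun k => PySem.List.slice line (some k) (some (k + m)))
        else out) acc := by
  intro K
  induction K with
  | zero =>
    intro i acc hK
    rw [pvALoop, dif_neg (by omega), List.drop_eq_nil_of_le (by omega), List.foldl_nil]
  | succ K ih =>
    intro i acc hK
    by_cases hin : i < ls.length
    · rw [pvALoop, dif_pos hin, List.drop_eq_getElem_cons hin, List.foldl_cons]
      have hsp : ¬ (("sliced" : String) = "spliced") := by decide
      by_cases hlong : m < ((ls[i]).length : Int)
      · have h30 : 30 < m := by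
          rcases hpre with h30 | hall
          · exact h30
          · exact absurd (hall ls[i] (ls.getElem_mem hin)) (by omega)
        simp only [and_true, if_pos hlong]
        rw [pvValidationSegment, pvSegLoopEq ls[i] m (m - 30) (by omega)
          ((ls[i].length : Int) - 0).toNat 0 [] (by omega)]
        simp only [List.nil_append]
        apply ih (i+1) _ (by omega)
      · simp only [and_true, if_neg hsp, if_neg hlong]
        apply ih (i+1) _ (by omega)
    · rw [pvALoop, dif_neg hin, List.drop_eq_nil_of_le (by omega), List.foldl_nil]

theorem pvOtherEq (ls : List (List Char)) (m : Int) (dtype : String)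
    (h1 : dtype ≠ "sliced") (h2 : dtype ≠ "spliced") :
    ∀ (K i : Nat) (acc : List (List Char)), ls.length - i ≤ K →
    pvALoop ls m dtype i acc = acc := by
  intro K
  induction K with
  | zero =>
    intro i acc hK
    rw [pvALoop, dif_neg (by omega)]
  | succ K ih =>
    intro i acc hK
    by_cases hin : i < ls.length
    · rw [pvALoop, dif_pos hin]
      have hA : ¬ (m < ((ls[i]).length : Int) ∧ dtype = "sliced") := fun hc => h1 hc.2
      simp only [if_neg hA, if_neg h2]
      exact ih (i+1) _ (by omega)
    · rw [pvALoop, dif_neg hin]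

-- ===== VERDICT (by name: the statement is the Claim_ definition above) =====
theorem concatenate_validation_spec : Claim_equal_concatenate_validation := by
  intro lines max_length dtype hdom hpre
  unfold Pre_concatenate_validation at hpre
  unfold Spec_concatenate_validation
  unfold concatenate_validation concatenate_validation_alt
  by_cases h1 : dtype = "sliced"
  · subst h1
    rw [if_pos rfl]
    have hp : 30 < max_length ∨ ∀ l ∈ lines.map String.toList, (l.length : Int) ≤ max_length := by
      rcases hpre rfl with h | h
      · exact Or.inl h
      · refine Or.inr (fun l hl => ?_)
        rcases List.mem_map.mp hl with ⟨s, hs, rfl⟩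
        exact h s hs
    rw [pvSlicedEq (lines.map String.toList) max_length hp
      ((lines.map String.toList).length - 0) 0 [] (by omega)]
    simp
  · rw [if_neg h1]
    by_cases h2 : dtype = "spliced"
    · subst h2
      rw [if_pos rfl]
      have hpref : ∀ k, k ≤ (lines.map String.toList).length →
          (List.scanl (fun a l => a + ((l : List Char).length : Int)) 0 (lines.map String.toList)).getD k 0
            = pvSum (lines.map String.toList) k := by
        intro k hk
        rw [pvScanlGetD (lines.map String.toList) 0 k hk]
        omega
      rw [pvSplicedEq (lines.map String.toList) max_length _ hpref
        ((lines.map String.toList).length - 0) 0 0 [] (by omega) (by omega) (fun k hk1 hk2 => by omega)]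
    · rw [if_neg h2]
      rw [pvOtherEq (lines.map String.toList) max_length dtype h1 h2
        ((lines.map String.toList).length - 0) 0 [] (by omega)]
      simp
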